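-- pv_equiv track=rewrite | github.com/yeaminurr/Computer-Graphics-Solutions | jup.py | createManualTable
-- ===== SOURCE A (Python) =====
-- def createManualTable(nodeInfo, node):
--     table = {}
--     emtab = {}
--     tempNode = {}
--     emptem = {}
--     for item in node:
--         nodeOfTable = nodeInfo[item].keys()
--         for item1 in node:
--             if item1 == item:
--                 tempNode.update({item1: 0})
--             elif item1 in nodeOfTable:
--                 tempNode.update({item1: nodeInfo[item][item1]})
--             else:
--                 tempNode.update({item1: 10000})
--             emptem.update({item1: 10000})
--         table.update({item: tempNode})
--         emtab.update({item: emptem})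
--         tempNode = {}
--         emptem = {}
--     return (table, emtab)
-- ===== SOURCE B (Python) =====
-- def createManualTable(nodeInfo, node):
--     # Fill-then-overwrite: one all-10000 base row, copied per node; then only the
--     # sparse adjacency entries overwrite, and the diagonal is set to 0 last.
--     base = {n: 10000 for n in node}
--     emtab = {n: dict(base) for n in node}
--     table = {}
--     for item in node:
--         row = dict(base)
--         for target, w in nodeInfo[item].items():
--             if target in row:
--                 row[target] = w
--         row[item] = 0
--         table[item] = row
--     return (table, emtab)
-- ===== Notes on version B (the rewrite author's own statement) =====
-- stated objective: alternative
-- what changed: Instead of deciding each cell of the dense table with a per-pair conditional scan (diagonal / edge / 10000), B builds one all-10000 base row, copies it per node (which directly yields emtab), then overwrites only the entries present in the node's sparse adjacency dict and zeroes the diagonal last.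
import Mathlib
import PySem

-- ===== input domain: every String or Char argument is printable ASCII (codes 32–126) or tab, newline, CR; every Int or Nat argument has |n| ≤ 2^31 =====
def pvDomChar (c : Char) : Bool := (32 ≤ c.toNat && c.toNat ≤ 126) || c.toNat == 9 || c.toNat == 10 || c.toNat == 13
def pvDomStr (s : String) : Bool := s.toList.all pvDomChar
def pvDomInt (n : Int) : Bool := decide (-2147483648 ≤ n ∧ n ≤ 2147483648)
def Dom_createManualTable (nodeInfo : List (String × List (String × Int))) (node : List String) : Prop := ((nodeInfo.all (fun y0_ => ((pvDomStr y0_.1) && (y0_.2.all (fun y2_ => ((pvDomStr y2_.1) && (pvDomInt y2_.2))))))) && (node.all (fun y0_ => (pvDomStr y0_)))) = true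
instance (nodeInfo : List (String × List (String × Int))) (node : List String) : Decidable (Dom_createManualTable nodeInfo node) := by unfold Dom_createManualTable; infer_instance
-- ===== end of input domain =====

-- B replaces A's per-cell conditional scan over all node pairs by a fill-then-overwrite
-- pass over the sparse adjacency lists (same result; different decomposition).


-- ===== PORT A =====
def createManualTable (nodeInfo : List (String × List (String × Int))) (node : List String) : (List (String × List (String × Int))) × (List (String × List (String × Int))) :=
  let nd : PySem.Dict String (List (String × Int)) := PySem.Dict.mk nodeInfo
  let st := node.foldl
    (fun (st : PySem.Dict String (List (String × Int)) × PySem.Dict String (List (String × Int))) item =>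
      -- nodeOfTable = nodeInfo[item].keys(); nodeInfo[item] raises KeyError when item
      -- is not a key of nodeInfo — those inputs are excluded by Pre_ (getD [] is only a totalizing guard)
      let inner : PySem.Dict String Int := PySem.Dict.mk ((nd.get? item).getD [])
      let nodeOfTable := inner.keys
      let rows := node.foldl
        (fun (st2 : PySem.Dict String Int × PySem.Dict String Int) item1 =>
          ((if item1 = item then st2.1.insert item1 0
            else if item1 ∈ nodeOfTable then st2.1.insert item1 (inner.getD item1 0)
            else st2.1.insert item1 10000),
           st2.2.insert item1 10000))
        (PySem.Dict.empty, PySem.Dict.empty)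
      (st.1.insert item rows.1.items, st.2.insert item rows.2.items))
    (PySem.Dict.empty, PySem.Dict.empty)
  (st.1.items, st.2.items)

-- ===== PORT B =====
def createManualTable_alt (nodeInfo : List (String × List (String × Int))) (node : List String) : (List (String × List (String × Int))) × (List (String × List (String × Int))) :=
  let nd : PySem.Dict String (List (String × Int)) := PySem.Dict.mk nodeInfo
  let base : PySem.Dict String Int := node.foldl (fun d n => d.insert n 10000) PySem.Dict.empty
  let emtab := node.foldl
    (fun (d : PySem.Dict String (List (String × Int))) n => d.insert n base.items) PySem.Dict.empty
  let table := node.foldl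
    (fun (t : PySem.Dict String (List (String × Int))) item =>
      -- for target, w in nodeInfo[item].items(): if target in row: row[target] = w
      let row := ((nd.get? item).getD []).foldl
        (fun (r : PySem.Dict String Int) p => if r.contains p.1 then r.insert p.1 p.2 else r) base
      let row := row.insert item 0
      t.insert item row.items) PySem.Dict.empty
  (table.items, emtab.items)

-- ===== PRECONDITION & SPEC =====
-- Pre_ excludes (a) inputs where some element of node is not a key of nodeInfo — there the
-- Python A raises KeyError — and (b) association lists whose inner lists carry duplicate
-- keys, which do not represent any Python dict (dicts have unique keys).
def Pre_createManualTable (nodeInfo : List (String × List (String × Int))) (node : List String) : Prop :=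
  (∀ s ∈ node, (PySem.Dict.mk nodeInfo : PySem.Dict String (List (String × Int))).contains s = true) ∧
  (∀ p ∈ nodeInfo, (p.2.map Prod.fst).Nodup)
instance (nodeInfo : List (String × List (String × Int))) (node : List String) : Decidable (Pre_createManualTable nodeInfo node) := by unfold Pre_createManualTable; infer_instance

def pvWitness_createManualTable : (List (String × List (String × Int))) × List String :=
  ([("a", [("b", 2)]), ("b", [])], ["a", "b"])

def Spec_createManualTable (nodeInfo : List (String × List (String × Int))) (node : List String) (out : (List (String × List (String × Int))) × (List (String × List (String × Int)))) : Prop := out = createManualTable_alt nodeInfo node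
instance (nodeInfo : List (String × List (String × Int))) (node : List String) (out : (List (String × List (String × Int))) × (List (String × List (String × Int)))) : Decidable (Spec_createManualTable nodeInfo node out) := by unfold Spec_createManualTable; infer_instance

-- ===== CLAIM (what is proved, stated in full; the proofs are below) =====
def Claim_equal_createManualTable : Prop := ∀ (nodeInfo : List (String × List (String × Int))) (node : List String), Dom_createManualTable nodeInfo node → Pre_createManualTable nodeInfo node → Spec_createManualTable nodeInfo node (createManualTable nodeInfo node)

-- ===== LEMMAS AND PROOFS =====

-- the three insert-branches of A's inner loop are one insert of a branched value
lemma pv_insert_branches (d : PySem.Dict String Int) (x item : String) (ks : List String)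
    (inn : PySem.Dict String Int) :
    (if x = item then d.insert x 0
     else if x ∈ ks then d.insert x (inn.getD x 0)
     else d.insert x 10000)
    = d.insert x (if x = item then 0 else if x ∈ ks then inn.getD x 0 else 10000) := by
  split_ifs <;> rfl

-- contains after a fold inserting a value that depends only on the key
lemma pv_contains_foldl_insert_fn (l : List String) (f : String → Int)
    (d : PySem.Dict String Int) (k : String) :
    (l.foldl (fun d x => d.insert x (f x)) d).contains k = (decide (k ∈ l) || d.contains k) := by
  induction l generalizing d with
  | nil => simp
  | cons a l ih =>
      rw [List.foldl_cons, ih, PySem.Dict.contains_insert]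
      by_cases h : k = a
      · subst h; simp
      · simp [List.mem_cons, h, beq_eq_false_iff_ne.mpr h]

-- getD after a fold inserting a value that depends only on the key
lemma pv_getD_foldl_insert_fn (l : List String) (f : String → Int)
    (d : PySem.Dict String Int) (k : String) (v0 : Int) :
    (l.foldl (fun d x => d.insert x (f x)) d).getD k v0 = if k ∈ l then f k else d.getD k v0 := by
  induction l generalizing d with
  | nil => simp
  | cons a l ih =>
      rw [List.foldl_cons, ih]
      by_cases hl : k ∈ l <;> by_cases ha : k = a <;>
        simp [hl, ha, PySem.Dict.getD_insert]

-- the guarded-overwrite fold never changes the key list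
lemma pv_overwrite_keys (l : List (String × Int)) (r : PySem.Dict String Int) :
    (l.foldl (fun r p => if r.contains p.1 then r.insert p.1 p.2 else r) r).keys = r.keys := by
  induction l generalizing r with
  | nil => rfl
  | cons p l ih =>
      rw [List.foldl_cons]
      by_cases h : r.contains p.1 = true
      · rw [if_pos h, ih, PySem.Dict.keys_insert_of_contains _ _ h]
      · rw [if_neg h, ih]

lemma pv_overwrite_contains (l : List (String × Int)) (r : PySem.Dict String Int) (k : String) :
    (l.foldl (fun r p => if r.contains p.1 then r.insert p.1 p.2 else r) r).contains k
      = r.contains k := by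
  rw [PySem.Dict.contains_eq_decide_mem_keys, PySem.Dict.contains_eq_decide_mem_keys,
    pv_overwrite_keys]

-- getD after the guarded-overwrite fold over a duplicate-free pair list
lemma pv_overwrite_getD (l : List (String × Int)) (hl : (l.map Prod.fst).Nodup)
    (r : PySem.Dict String Int) (k : String) (v0 : Int) :
    (l.foldl (fun r p => if r.contains p.1 then r.insert p.1 p.2 else r) r).getD k v0 =
      if k ∈ l.map Prod.fst ∧ r.contains k = true
      then (PySem.Dict.mk l : PySem.Dict String Int).getD k v0 else r.getD k v0 := by
  induction l generalizing r with
  | nil => simp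
  | cons p l ih =>
      obtain ⟨a, w⟩ := p
      rw [List.map_cons] at hl
      rw [List.foldl_cons, ih hl.of_cons]
      have hc : (if r.contains a then r.insert a w else r).contains k = r.contains k := by
        by_cases h : r.contains a = true
        · rw [if_pos h, PySem.Dict.contains_insert]
          by_cases hk : k = a <;> simp [hk, h]
        · rw [if_neg h]
      rw [hc]
      by_cases hk : k = a
      · subst hk
        have hkl : k ∉ l.map Prod.fst := by
          intro hm; exact (List.nodup_cons.mp hl).1 hm
        by_cases h : r.contains k = true
        · simp [hkl, h, PySem.Dict.getD_eq_get?_getD, PySem.Dict.get?_mk_cons]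
        · simp [hkl, h]
      · have hg : (if r.contains a then r.insert a w else r).getD k v0 = r.getD k v0 := by
          by_cases h : r.contains a = true
          · rw [if_pos h, PySem.Dict.getD_insert, if_neg hk]
          · rw [if_neg h]
        rw [hg]
        by_cases hm : k ∈ l.map Prod.fst <;> by_cases h : r.contains k = true <;>
          simp [hm, h, hk, Ne.symm hk, PySem.Dict.getD_eq_get?_getD, PySem.Dict.get?_mk_cons]

-- a dict with duplicate-free keys is its key list paired with its lookups
lemma pv_items_eq_map_keys (d : PySem.Dict String Int) (hd : d.keys.Nodup) :
    d.items = d.keys.map (fun k => (k, d.getD k 0)) := by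
  have hkeys : d.keys = d.items.map Prod.fst := rfl
  rw [hkeys, List.map_map]
  have h2 : ∀ p ∈ d.items, ((fun k => (k, d.getD k 0)) ∘ Prod.fst) p = p := by
    intro p hp
    obtain ⟨k, v⟩ := p
    have := PySem.Dict.getD_of_mem_items d hp hd (d0 := (0 : Int))
    simp [Function.comp, this]
  rw [List.map_congr_left h2]
  simp

lemma pv_dict_eq_of_keys_getD (d e : PySem.Dict String Int) (hd : d.keys.Nodup)
    (hk : d.keys = e.keys) (hg : ∀ k, d.getD k 0 = e.getD k 0) : d = e := by
  have he : e.keys.Nodup := hk ▸ hd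
  apply PySem.Dict.ext
  rw [pv_items_eq_map_keys d hd, pv_items_eq_map_keys e he, hk]
  exact List.map_congr_left (fun k _ => by rw [hg])

-- the central row equality: A's per-cell scan builds the same row dict as B's
-- fill-then-overwrite pass followed by zeroing the diagonal
lemma pv_row_eq (node : List String) (item : String) (li : List (String × Int))
    (hmem : item ∈ node) (hnd : (li.map Prod.fst).Nodup) :
    node.foldl (fun (d : PySem.Dict String Int) x =>
        if x = item then d.insert x 0
        else if x ∈ (PySem.Dict.mk li : PySem.Dict String Int).keys then
          d.insert x ((PySem.Dict.mk li : PySem.Dict String Int).getD x 0)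
        else d.insert x 10000) PySem.Dict.empty
    = (li.foldl (fun (r : PySem.Dict String Int) p => if r.contains p.1 then r.insert p.1 p.2 else r)
        (node.foldl (fun (d : PySem.Dict String Int) n => d.insert n 10000) PySem.Dict.empty)).insert
        item 0 := by
  simp only [pv_insert_branches]
  have hbc : (node.foldl (fun (d : PySem.Dict String Int) n => d.insert n 10000)
      PySem.Dict.empty).contains item = true := by
    rw [pv_contains_foldl_insert_fn node (fun _ => 10000)]
    simp [hmem]
  have hoc : (li.foldl (fun (r : PySem.Dict String Int) p =>
      if r.contains p.1 then r.insert p.1 p.2 else r)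
      (node.foldl (fun (d : PySem.Dict String Int) n => d.insert n 10000)
        PySem.Dict.empty)).contains item = true := by
    rw [pv_overwrite_contains]; exact hbc
  apply pv_dict_eq_of_keys_getD
  · exact PySem.Dict.nodup_keys_foldl_insert node _ _ PySem.Dict.nodup_keys_empty
  · rw [PySem.Dict.keys_insert_of_contains _ _ hoc, pv_overwrite_keys,
      PySem.Dict.keys_foldl_insert, PySem.Dict.keys_foldl_insert]
  · intro k
    rw [pv_getD_foldl_insert_fn, PySem.Dict.getD_insert, pv_overwrite_getD li hnd,
      pv_getD_foldl_insert_fn, pv_contains_foldl_insert_fn]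
    by_cases hk : k = item
    · subst hk; simp [hmem]
    · by_cases hn : k ∈ node
      · by_cases hin : k ∈ li.map Prod.fst <;>
          simp [hn, hk, hin, PySem.Dict.keys_mk]
      · simp [hn, hk]

-- ===== VERDICT (by name: the statement is the Claim_ definition above) =====
theorem createManualTable_spec : Claim_equal_createManualTable := by
  intro nodeInfo node hdom hpre
  unfold Spec_createManualTable
  simp only [createManualTable, createManualTable_alt]
  have hnodup : ∀ s : String,
      (((((PySem.Dict.mk nodeInfo : PySem.Dict String (List (String × Int))).get? s).getD
        []).map Prod.fst)).Nodup := by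
    intro s
    cases h : (PySem.Dict.mk nodeInfo : PySem.Dict String (List (String × Int))).get? s with
    | none => simp
    | some l =>
        simpa using hpre.2 (s, l) (PySem.Dict.mem_items_of_get?_eq_some _ h)
  refine Eq.trans (congrArg
    (fun p : PySem.Dict String (List (String × Int)) × PySem.Dict String (List (String × Int)) =>
      (p.1.items, p.2.items))
    (?_ : _ = (List.foldl
        (fun (t : PySem.Dict String (List (String × Int))) item =>
          t.insert item
            (((((PySem.Dict.mk nodeInfo : PySem.Dict String (List (String × Int))).get? item).getD
              []).foldl
              (fun (r : PySem.Dict String Int) p => if r.contains p.1 then r.insert p.1 p.2 else r)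
              (node.foldl (fun (d : PySem.Dict String Int) n => d.insert n 10000)
                PySem.Dict.empty)).insert item 0).items)
        PySem.Dict.empty node,
      List.foldl
        (fun (d : PySem.Dict String (List (String × Int))) n =>
          d.insert n
            (node.foldl (fun (d : PySem.Dict String Int) n => d.insert n 10000)
              PySem.Dict.empty).items)
        PySem.Dict.empty node))) rfl
  rw [← PySem.List.foldl_prod_mk]
  apply PySem.List.foldl_congr_mem
  intro acc item hitem
  rw [PySem.List.foldl_prod_mk
    (fun (t : PySem.Dict String Int) item1 =>
      if item1 = item then t.insert item1 0
      else if item1 ∈ (PySem.Dict.mk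
          (((PySem.Dict.mk nodeInfo : PySem.Dict String (List (String × Int))).get?
            item).getD []) : PySem.Dict String Int).keys then
        t.insert item1
          ((PySem.Dict.mk
            (((PySem.Dict.mk nodeInfo : PySem.Dict String (List (String × Int))).get?
              item).getD []) : PySem.Dict String Int).getD item1 0)
      else t.insert item1 10000)
    (fun (e : PySem.Dict String Int) item1 => e.insert item1 10000)
    node PySem.Dict.empty PySem.Dict.empty]
  simp only [Prod.mk.injEq]
  refine ⟨?_, trivial⟩
  rw [pv_row_eq node item _ hitem (hnodup item)]
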